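-- pv_equiv track=rewrite | github.com/jjuraska/slug2slug | slot_aligner/slot_alignment.py | platformsSlot
-- ===== SOURCE A (Python) =====
-- def platformsSlot(sent, value):
--     leftmost_pos = -1
--
--     # Split the slot-value into individual items and extract the first word of each item only
--     platforms = [item.split(' ')[0] for item in value.split('; ')]
--
--     # Search for all individual items exhaustively
--     for platform in platforms:
--         pos = sent.find(platform)
--         if pos >= 0:
--             if leftmost_pos == -1 or pos < leftmost_pos:
--                 leftmost_pos = pos
--         else:
--             return pos
--
--     return leftmost_pos
-- ===== SOURCE B (Python) =====
-- def platformsSlot(sent, value):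
--     # Scan the SENTENCE left-to-right instead of computing per-platform finds:
--     # after a membership pre-check, return the first index at which any
--     # platform starts.
--     platforms = [item.split(' ')[0] for item in value.split('; ')]
--     if not all(p in sent for p in platforms):
--         return -1
--     for i in range(len(sent) + 1):
--         if any(sent.startswith(p, i) for p in platforms):
--             return i
--     return -1  # unreachable: every platform occurs in sent
-- ===== Notes on version B (the rewrite author's own statement) =====
-- stated objective: alternative
-- what changed: Instead of computing each platform's find position and tracking the minimum with early exit, B pre-checks that every platform occurs in the sentence and then scans the SENTENCE positions left to right, returning the first index at which some platform starts.
import Mathlib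
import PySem

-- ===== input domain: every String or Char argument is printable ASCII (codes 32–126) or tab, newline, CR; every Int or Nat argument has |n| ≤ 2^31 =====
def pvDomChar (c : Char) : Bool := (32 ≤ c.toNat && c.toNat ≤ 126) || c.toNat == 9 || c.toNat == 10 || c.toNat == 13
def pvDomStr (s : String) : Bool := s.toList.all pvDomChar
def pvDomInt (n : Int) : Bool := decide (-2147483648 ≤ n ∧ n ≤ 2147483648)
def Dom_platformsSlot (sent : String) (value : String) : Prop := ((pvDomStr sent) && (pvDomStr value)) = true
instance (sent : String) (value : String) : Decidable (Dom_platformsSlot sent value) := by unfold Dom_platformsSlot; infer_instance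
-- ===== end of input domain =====

-- B replaces A's per-platform find-and-track-minimum loop by a membership pre-check plus a left-to-right scan of the sentence positions, returning the first index at which some platform starts; same return value, different traversal.

-- ===== PORT A =====
-- value.split('; '); split? is none only for an empty separator, so getD's default is unreachable
def pvItems (value : String) : List String := (PySem.Str.split? value "; ").getD []

-- item.split(' ')[0]; the split list is never empty, so the [] branch is unreachable
def pvFirstWord (item : String) : String :=
  match (PySem.Str.split? item " ").getD [] with
  | w :: _ => w
  | [] => ""

-- the 'for platform in platforms' loop with early return, state = leftmost_pos
def pvPlatLoop (sent : String) (platforms : List String) (leftmost : Int) : Int :=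
  match platforms with
  | [] => leftmost
  | p :: rest =>
    let pos := PySem.Str.find sent p
    if 0 ≤ pos then
      if leftmost = -1 ∨ pos < leftmost then pvPlatLoop sent rest pos
      else pvPlatLoop sent rest leftmost
    else pos

def platformsSlot (sent : String) (value : String) : Int :=
  let platforms := (pvItems value).map pvFirstWord
  pvPlatLoop sent platforms (-1)

-- ===== PORT B =====
-- 'for i in range(len(sent)+1): if any(sent.startswith(p, i) …): return i'
-- sent.startswith(p, i) for 0 ≤ i ≤ len(sent) is exactly 'p is a prefix of sent[i:]',
-- ported by hand as PySem.Chars.startswith on (sent.toList.drop i.toNat); exact on that range.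
def pvScanLoop (sentC : List Char) (plats : List String) : List Int → Int
  | [] => -1  -- the fallthrough 'return -1' (unreachable when every platform occurs)
  | i :: rest =>
    if plats.any (fun p => PySem.Chars.startswith (sentC.drop i.toNat) p.toList) then i
    else pvScanLoop sentC plats rest

def platformsSlot_alt (sent : String) (value : String) : Int :=
  let platforms := (pvItems value).map pvFirstWord
  if platforms.all (fun p => PySem.Str.isIn p sent) then
    pvScanLoop sent.toList platforms (PySem.List.pyRange 0 ((PySem.Str.len sent : Int) + 1) 1)
  else -1

-- ===== PRECONDITION & SPEC =====
def Spec_platformsSlot (sent : String) (value : String) (out : Int) : Prop := out = platformsSlot_alt sent value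
instance (sent : String) (value : String) (out : Int) : Decidable (Spec_platformsSlot sent value out) := by unfold Spec_platformsSlot; infer_instance

-- ===== CLAIM (what is proved, stated in full; the proofs are below) =====
def Claim_equal_platformsSlot : Prop := ∀ (sent : String) (value : String), Dom_platformsSlot sent value → Spec_platformsSlot sent value (platformsSlot sent value)

-- ===== LEMMAS AND PROOFS =====
theorem pvFind_neg_one_le (sent p : String) : (-1 : Int) ≤ PySem.Str.find sent p := by
  simpa using PySem.Chars.neg_one_le_find sent.toList p.toList

-- A's loop computes: -1 if some platform is absent, else the minimum of the finds
theorem pvPlatLoop_eq (sent : String) (ps : List String) (L : Int) (hL : 0 ≤ L) :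
    pvPlatLoop sent ps L =
      if (ps.map (PySem.Str.find sent)).any (fun p => decide (p < 0)) then -1
      else (ps.map (PySem.Str.find sent)).foldl min L := by
  induction ps generalizing L with
  | nil => simp [pvPlatLoop]
  | cons p rest ih =>
    have hfind := pvFind_neg_one_le sent p
    by_cases hpos : 0 ≤ PySem.Str.find sent p
    · have hd : decide (PySem.Str.find sent p < 0) = false := decide_eq_false (by omega)
      by_cases hlt : PySem.Str.find sent p < L
      · have hstep : pvPlatLoop sent (p :: rest) L =
            pvPlatLoop sent rest (PySem.Str.find sent p) := by
          simp only [pvPlatLoop]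
          rw [if_pos hpos, if_pos (Or.inr hlt)]
        rw [hstep, ih _ hpos, List.map_cons, List.any_cons, hd, Bool.false_or,
            List.foldl_cons, min_eq_right (le_of_lt hlt)]
      · have hstep : pvPlatLoop sent (p :: rest) L = pvPlatLoop sent rest L := by
          simp only [pvPlatLoop]
          rw [if_pos hpos, if_neg (not_or.mpr ⟨by omega, hlt⟩)]
        rw [hstep, ih _ hL, List.map_cons, List.any_cons, hd, Bool.false_or,
            List.foldl_cons, min_eq_left (by omega)]
    · have h1 : PySem.Str.find sent p = -1 := by omega
      simp only [pvPlatLoop]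
      rw [if_neg hpos, List.map_cons, List.any_cons, h1]
      norm_num

theorem pvKey (sent : String) (ws : List String) :
    pvPlatLoop sent ws (-1) =
      if (ws.map (PySem.Str.find sent)).any (fun p => decide (p < 0)) then -1
      else
        match PySem.List.min? (ws.map (PySem.Str.find sent)) (fun x => x) with
        | some m => m
        | none => -1 := by
  cases ws with
  | nil =>
    have hm : PySem.List.min? ([] : List Int) (fun x => x) = none :=
      (PySem.List.min?_eq_none_iff _ _).mpr rfl
    simp [pvPlatLoop, hm]
  | cons w t =>
    by_cases hpos : 0 ≤ PySem.Str.find sent w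
    · have hstep : pvPlatLoop sent (w :: t) (-1) = pvPlatLoop sent t (PySem.Str.find sent w) := by
        simp only [pvPlatLoop]
        rw [if_pos hpos, if_pos (Or.inl trivial)]
      rw [hstep, pvPlatLoop_eq sent t _ hpos, List.map_cons, List.any_cons,
          PySem.List.min?_id_cons, decide_eq_false (show ¬ PySem.Str.find sent w < 0 by omega),
          Bool.false_or]
    · have h1 : PySem.Str.find sent w = -1 := by
        have := pvFind_neg_one_le sent w; omega
      simp only [pvPlatLoop]
      rw [if_neg hpos, List.map_cons, List.any_cons, h1]
      norm_num

-- The sentence scan returns m when m is in [a, b), matches, and nothing before it (≥ a) matches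
theorem pvScan_first (sentC : List Char) (plats : List String) (b m : Int)
    (hb : m < b)
    (hP : plats.any (fun p => PySem.Chars.startswith (sentC.drop m.toNat) p.toList) = true) :
    ∀ (n : Nat) (a : Int), (m - a).toNat = n → a ≤ m →
      (∀ i, a ≤ i → i < m →
        plats.any (fun p => PySem.Chars.startswith (sentC.drop i.toNat) p.toList) = false) →
      pvScanLoop sentC plats (PySem.List.pyRange a b 1) = m := by
  intro n
  induction n with
  | zero =>
    intro a hn ham _
    have ham' : a = m := by omega
    subst ham'
    rw [PySem.List.pyRange_one_cons (by omega), pvScanLoop, if_pos hP]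
  | succ k ih =>
    intro a hn ham hpre
    have haltm : a < m := by omega
    rw [PySem.List.pyRange_one_cons (by omega), pvScanLoop,
        if_neg (by rw [hpre a le_rfl haltm]; simp)]
    exact ih (a + 1) (by omega) (by omega) (fun i h1 h2 => hpre i (by omega) h2)

-- Scan with no platforms falls through to -1
theorem pvScan_nil (sentC : List Char) (l : List Int) : pvScanLoop sentC [] l = -1 := by
  induction l with
  | nil => rfl
  | cons i rest ih => simpa [pvScanLoop] using ih

-- any-find-negative is the complement of all-present
theorem pvAnyNeg_eq (sent : String) (ws : List String) :
    ((ws.map (PySem.Str.find sent)).any (fun p => decide (p < 0)))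
      = !(ws.all (fun p => PySem.Str.isIn p sent)) := by
  induction ws with
  | nil => rfl
  | cons w t ih =>
    have hle := pvFind_neg_one_le sent w
    rw [List.map_cons, List.any_cons, List.all_cons, ih, Bool.not_and]
    congr 1
    by_cases hin : PySem.Chars.isIn w.toList sent.toList = true
    · have hinf : w.toList <:+: sent.toList := (PySem.Chars.isIn_iff_infix _ _).mp hin
      have h0 : 0 ≤ PySem.Chars.find sent.toList w.toList :=
        (PySem.Chars.find_nonneg_iff _ _).mpr hinf
      simp [hin, show ¬ PySem.Chars.find sent.toList w.toList < 0 by omega]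
    · have hinf : ¬ w.toList <:+: sent.toList := fun h =>
        hin ((PySem.Chars.isIn_iff_infix _ _).mpr h)
      have h1 : PySem.Chars.find sent.toList w.toList = -1 :=
        (PySem.Chars.find_eq_neg_one_iff _ _).mpr hinf
      simp [hin, h1]

-- ===== VERDICT (by name: the statement is the Claim_ definition above) =====
theorem platformsSlot_spec : Claim_equal_platformsSlot := by
  intro sent value _
  unfold Spec_platformsSlot
  simp only [platformsSlot, platformsSlot_alt]
  set ws := (pvItems value).map pvFirstWord with hws
  rw [pvKey, pvAnyNeg_eq]
  by_cases hall : ws.all (fun p => PySem.Str.isIn p sent) = true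
  · rw [hall]
    simp only [Bool.not_true]
    cases hws' : ws with
    | nil =>
      rw [pvScan_nil]
      have hm : PySem.List.min? ([] : List Int) (fun x => x)
          = none := (PySem.List.min?_eq_none_iff _ _).mpr rfl
      simp [hm]
    | cons w t =>
      rw [hws'] at hall
      have hnn : ∀ p ∈ (w :: t), 0 ≤ PySem.Str.find sent p := by
        intro p hp
        exact (PySem.Str.find_nonneg_iff sent p).mpr
          ((PySem.Str.isIn_iff_infix p sent).mp (List.all_eq_true.mp hall p hp))
      have hmin : PySem.List.min? ((w :: t).map (PySem.Str.find sent)) (fun x => x) =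
          some ((t.map (PySem.Str.find sent)).foldl min (PySem.Str.find sent w)) := by
        rw [List.map_cons, PySem.List.min?_id_cons]
      set m := (t.map (PySem.Str.find sent)).foldl min (PySem.Str.find sent w) with hm
      rw [hmin]
      have hmem : m ∈ (w :: t).map (PySem.Str.find sent) := PySem.List.min?_mem hmin
      have hismin : ∀ y ∈ (w :: t).map (PySem.Str.find sent), m ≤ y := by
        intro y hy
        simpa using PySem.List.min?_isMin hmin y hy
      obtain ⟨q, hq, hqm⟩ := List.mem_map.mp hmem
      have hcq : PySem.Chars.find sent.toList q.toList = m := by rw [← hqm]; simp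
      have hq0 : (0 : Int) ≤ m := by rw [← hqm]; exact hnn q hq
      have hsp := PySem.Chars.find_spec (s := sent.toList) (sub := q.toList)
        (by rw [hcq]; exact hq0)
      rw [hcq] at hsp
      -- m matches some platform
      have hPm : (w :: t).any
          (fun p => PySem.Chars.startswith (sent.toList.drop m.toNat) p.toList) = true :=
        List.any_eq_true.mpr ⟨q, hq, (PySem.Chars.startswith_iff _ _).mpr hsp.1⟩
      -- nothing before m matches
      have hPre : ∀ i, (0 : Int) ≤ i → i < m →
          (w :: t).any
            (fun p => PySem.Chars.startswith (sent.toList.drop i.toNat) p.toList) = false := by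
        intro i hi0 him
        apply List.any_eq_false.mpr
        intro p hp hsw
        have hcp : PySem.Chars.find sent.toList p.toList = PySem.Str.find sent p := by simp
        have hp0 : 0 ≤ PySem.Str.find sent p := hnn p hp
        have hple : m ≤ PySem.Str.find sent p := hismin _ (List.mem_map.mpr ⟨p, hp, rfl⟩)
        have hspp := PySem.Chars.find_spec (s := sent.toList) (sub := p.toList)
          (by rw [hcp]; exact hp0)
        have hlt : i.toNat < (PySem.Chars.find sent.toList p.toList).toNat := by
          rw [hcp]; omega
        exact hspp.2 i.toNat hlt ((PySem.Chars.startswith_iff _ _).mp hsw)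
      -- m lies inside the scanned range [0, len(sent)+1)
      have hmlen : m ≤ (sent.toList.length : Int) := by
        rw [← hcq]; exact_mod_cast PySem.Chars.find_le_length sent.toList q.toList
      have hlen : (PySem.Str.len sent : Int) = (sent.toList.length : Int) := by simp
      exact (pvScan_first sent.toList (w :: t) ((PySem.Str.len sent : Int) + 1) m
        (by omega) hPm m.toNat 0 (by omega) hq0 hPre).symm
  · rw [Bool.eq_false_iff.mpr hall]
    simp
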